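-- pv_equiv track=rewrite | github.com/Shradhasingh31/Online-exam | Shradha.py | funn
-- ===== SOURCE A (Python) =====
-- def funn(n, lst):
--     maxi=0
--     for i in range(2,len(lst),3):
--         if lst[i]>maxi:
--             maxi=lst[i]
--     s=0
--     c=0
--     for i in range(2,len(lst),3):
--         if lst[i]!=maxi:
--             s+=lst[i]
--             c+=1
--     l1=[]
--     l1.append(c)
--     l1.append(s)
--     return l1
-- ===== SOURCE B (Python) =====
-- def funn(n, lst):
--     total_sum = 0
--     total_count = 0
--     maxi = 0
--     maxcount = 0
--     for i in range(2, len(lst), 3):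
--         x = lst[i]
--         total_sum += x
--         total_count += 1
--         if x > maxi:
--             maxi = x
--             maxcount = 1
--         elif x == maxi:
--             maxcount += 1
--     return [total_count - maxcount, total_sum - maxi * maxcount]
-- ===== Notes on version B (the rewrite author's own statement) =====
-- stated objective: alternative
-- what changed: Replaces A's two passes (find max, then filter-and-accumulate elements != max) with one accumulate pass keeping running sum/count/max/max-multiplicity over the strided elements, subtracting the max's contribution at the end.
import Mathlib
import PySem

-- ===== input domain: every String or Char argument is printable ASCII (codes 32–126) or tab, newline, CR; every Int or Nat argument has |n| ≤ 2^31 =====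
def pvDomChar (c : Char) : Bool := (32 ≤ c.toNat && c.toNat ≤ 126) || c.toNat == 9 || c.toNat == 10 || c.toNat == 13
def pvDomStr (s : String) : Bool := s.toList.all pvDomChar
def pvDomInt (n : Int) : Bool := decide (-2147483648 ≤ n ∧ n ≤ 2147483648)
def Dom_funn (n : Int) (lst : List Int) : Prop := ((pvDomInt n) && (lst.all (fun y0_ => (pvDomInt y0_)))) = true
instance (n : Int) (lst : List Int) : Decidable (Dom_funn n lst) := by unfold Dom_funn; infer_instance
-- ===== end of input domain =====

-- B replaces A's two filtering passes by a single accumulate pass plus an end subtraction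
-- of the max's contribution (alternative decomposition, same cost; return value only).

-- ===== PORT A =====
-- lst[i] for i ∈ range(2, len(lst), 3) is always in range, so pyGetD is exact here.
def funn (n : Int) (lst : List Int) : List Int :=
  let idxs := PySem.List.pyRange 2 (lst.length : Int) 3
  let maxi := idxs.foldl
    (fun maxi i => if PySem.List.pyGetD lst i 0 > maxi then PySem.List.pyGetD lst i 0 else maxi) 0
  let sc := idxs.foldl
    (fun (sc : Int × Int) i =>
      if PySem.List.pyGetD lst i 0 ≠ maxi then (sc.1 + PySem.List.pyGetD lst i 0, sc.2 + 1) else sc)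
    (0, 0)
  [sc.2, sc.1]

-- ===== PORT B =====
-- state (total_sum, total_count, maxi, maxcount), one pass over the same strided indices
def funn_alt (n : Int) (lst : List Int) : List Int :=
  let st := (PySem.List.pyRange 2 (lst.length : Int) 3).foldl
    (fun (st : Int × Int × Int × Int) i =>
      let x := PySem.List.pyGetD lst i 0
      if x > st.2.2.1 then (st.1 + x, st.2.1 + 1, x, 1)
      else if x = st.2.2.1 then (st.1 + x, st.2.1 + 1, st.2.2.1, st.2.2.2 + 1)
      else (st.1 + x, st.2.1 + 1, st.2.2.1, st.2.2.2))
    (0, 0, 0, 0)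
  [st.2.1 - st.2.2.2, st.1 - st.2.2.1 * st.2.2.2]

-- ===== PRECONDITION & SPEC =====
def Spec_funn (n : Int) (lst : List Int) (out : List Int) : Prop := out = funn_alt n lst
instance (n : Int) (lst : List Int) (out : List Int) : Decidable (Spec_funn n lst out) := by unfold Spec_funn; infer_instance

-- ===== CLAIM (what is proved, stated in full; the proofs are below) =====
def Claim_equal_funn : Prop := ∀ (n : Int) (lst : List Int), Dom_funn n lst → Spec_funn n lst (funn n lst)

-- ===== LEMMAS AND PROOFS =====

-- A's first loop over an arbitrary value list, with arbitrary seed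
def pvMaxFold (m0 : Int) (ys : List Int) : Int :=
  ys.foldl (fun m x => if x > m then x else m) m0

lemma pvMaxFold_ge_seed (m0 : Int) (ys : List Int) : m0 ≤ pvMaxFold m0 ys := by
  induction ys generalizing m0 with
  | nil => simp [pvMaxFold]
  | cons y ys ih =>
    simp only [pvMaxFold, List.foldl_cons]
    split_ifs with h
    · exact le_trans (le_of_lt h) (ih y)
    · exact ih m0

lemma pvMaxFold_ge_mem (m0 : Int) (ys : List Int) : ∀ y ∈ ys, y ≤ pvMaxFold m0 ys := by
  induction ys generalizing m0 with
  | nil => simp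
  | cons z ys ih =>
    intro y hy
    simp only [List.mem_cons] at hy
    simp only [pvMaxFold, List.foldl_cons]
    rcases hy with rfl | hy
    · split_ifs with h
      · exact pvMaxFold_ge_seed y ys
      · exact le_trans (not_lt.mp h) (pvMaxFold_ge_seed m0 ys)
    · split_ifs with h <;> exact ih _ y hy

lemma pvMaxFold_append_singleton (m0 x : Int) (ys : List Int) :
    pvMaxFold m0 (ys ++ [x]) = if x > pvMaxFold m0 ys then x else pvMaxFold m0 ys := by
  simp [pvMaxFold, List.foldl_append]

lemma pvBFold_closed (ys : List Int) :
    ys.foldl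
      (fun (st : Int × Int × Int × Int) x =>
        if x > st.2.2.1 then (st.1 + x, st.2.1 + 1, x, 1)
        else if x = st.2.2.1 then (st.1 + x, st.2.1 + 1, st.2.2.1, st.2.2.2 + 1)
        else (st.1 + x, st.2.1 + 1, st.2.2.1, st.2.2.2))
      (0, 0, 0, 0)
    = (ys.sum, (ys.length : Int), pvMaxFold 0 ys, (ys.count (pvMaxFold 0 ys) : Int)) := by
  induction ys using List.reverseRecOn with
  | nil => simp [pvMaxFold]
  | append_singleton ys x ih =>
    rw [List.foldl_append, ih]
    simp only [List.foldl_cons, List.foldl_nil, pvMaxFold_append_singleton]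
    by_cases h1 : x > pvMaxFold 0 ys
    · have hnot : x ∉ ys := fun hx => absurd (pvMaxFold_ge_mem 0 ys x hx) (not_le.mpr h1)
      simp [h1, List.count_eq_zero.mpr hnot]
    · by_cases h2 : x = pvMaxFold 0 ys
      · simp [h1, h2, List.count_append]
      · simp [h1, h2, List.count_append, Ne.symm h2]

lemma pvAFold2_closed (m : Int) (ys : List Int) (s c : Int) :
    ys.foldl (fun (sc : Int × Int) x => if x ≠ m then (sc.1 + x, sc.2 + 1) else sc) (s, c)
    = (s + (ys.filter (fun y => y ≠ m)).sum, c + ((ys.filter (fun y => y ≠ m)).length : Int)) := by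
  induction ys generalizing s c with
  | nil => simp
  | cons y ys ih =>
    simp only [ne_eq, decide_not, ite_not] at ih ⊢
    simp only [List.foldl_cons, List.filter_cons, ite_not]
    by_cases h : y = m
    · simpa [h] using ih s c
    · rw [if_neg h, ih]
      simp [h]
      constructor <;> push_cast <;> ring

lemma pvSum_filter_ne (m : Int) (ys : List Int) :
    (ys.filter (fun y => y ≠ m)).sum = ys.sum - m * (ys.count m : Int) := by
  induction ys with
  | nil => simp
  | cons y ys ih =>
    simp only [ne_eq, decide_not] at ih
    simp only [List.filter_cons, List.count_cons, ne_eq, decide_not]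
    by_cases h : y = m
    · simp [h, ih]
      push_cast
      ring
    · simp [h, Ne.symm h, ih]
      ring

lemma pvLen_filter_ne (m : Int) (ys : List Int) :
    (((ys.filter (fun y => y ≠ m)).length : Int)) = (ys.length : Int) - (ys.count m : Int) := by
  induction ys with
  | nil => simp
  | cons y ys ih =>
    simp only [ne_eq, decide_not] at ih
    simp only [List.filter_cons, List.count_cons, ne_eq, decide_not]
    by_cases h : y = m
    · simp [h, ih]
    · simp [h, ih]
      push_cast
      ring

-- ===== VERDICT (by name: the statement is the Claim_ definition above) =====
theorem funn_spec : Claim_equal_funn := by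
  intro n lst _
  unfold Spec_funn funn funn_alt
  -- turn both folds over indices into folds over the strided value list ys
  set idxs := PySem.List.pyRange 2 (lst.length : Int) 3 with hidxs
  set ys := idxs.map (fun i => PySem.List.pyGetD lst i 0) with hys
  have hA1 : idxs.foldl
      (fun m i => if PySem.List.pyGetD lst i 0 > m then PySem.List.pyGetD lst i 0 else m) 0
      = pvMaxFold 0 ys := by
    rw [hys]; unfold pvMaxFold; rw [List.foldl_map]
  have hA2 : ∀ m : Int, idxs.foldl
      (fun (sc : Int × Int) i =>
        if PySem.List.pyGetD lst i 0 ≠ m then (sc.1 + PySem.List.pyGetD lst i 0, sc.2 + 1) else sc)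
      (0, 0)
      = ys.foldl (fun (sc : Int × Int) x => if x ≠ m then (sc.1 + x, sc.2 + 1) else sc) (0, 0) := by
    intro m; rw [hys, List.foldl_map]
  have hB : idxs.foldl
      (fun (st : Int × Int × Int × Int) i =>
        let x := PySem.List.pyGetD lst i 0
        if x > st.2.2.1 then (st.1 + x, st.2.1 + 1, x, 1)
        else if x = st.2.2.1 then (st.1 + x, st.2.1 + 1, st.2.2.1, st.2.2.2 + 1)
        else (st.1 + x, st.2.1 + 1, st.2.2.1, st.2.2.2))
      (0, 0, 0, 0)
      = ys.foldl
      (fun (st : Int × Int × Int × Int) x =>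
        if x > st.2.2.1 then (st.1 + x, st.2.1 + 1, x, 1)
        else if x = st.2.2.1 then (st.1 + x, st.2.1 + 1, st.2.2.1, st.2.2.2 + 1)
        else (st.1 + x, st.2.1 + 1, st.2.2.1, st.2.2.2))
      (0, 0, 0, 0) := by
    rw [hys, List.foldl_map]
  simp only [hA1, hA2, hB, pvBFold_closed, pvAFold2_closed]
  rw [pvSum_filter_ne, pvLen_filter_ne]
  simp
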